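-- pv_equiv track=rewrite | github.com/stefanoalimonti/carry-frobenius | experiments/F14_twisted_euler_product.py | witt_mul_exact
-- ===== SOURCE A (Python) =====
-- def witt_mul_exact(x, y, p, n):
--     """Witt multiplication via ghost components."""
--     x_int, y_int = list(x), list(y)
--     def ghost(a, k):
--         return sum(p**i * a[i]**(p**(k-i)) for i in range(k+1))
--     ghost_prod = [ghost(x_int, k) * ghost(y_int, k) for k in range(n)]
--     s = []
--     for k in range(n):
--         rhs = ghost_prod[k] - sum(p**i * s[i]**(p**(k-i)) for i in range(k))
--         s.append((rhs // p**k) % p)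
--     return tuple(s)
-- ===== SOURCE B (Python) =====
-- def witt_mul_exact(x, y, p, n):
--     """Witt multiplication via ghost components, with all p-power towers
--     maintained incrementally (each step raises the cached powers to the p-th power)
--     instead of recomputing a[i]**(p**(k-i)) from scratch at every k, and with the
--     two ghost components and the correction sum accumulated in one inner loop."""
--     s = []
--     xs, ys, sp = [], [], []   # xs[i] == x[i]**(p**(k-i)) during step k, etc.
--     pk = 1                    # p**k
--     for k in range(n):
--         xs = [v ** p for v in xs]
--         xs.append(x[k])
--         ys = [v ** p for v in ys]
--         ys.append(y[k])
--         sp = [v ** p for v in sp]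
--         pi = 1                # p**i
--         gx = gy = gs = 0
--         for i in range(k + 1):
--             gx += pi * xs[i]
--             gy += pi * ys[i]
--             if i < k:
--                 gs += pi * sp[i]
--             pi *= p
--         sk = ((gx * gy - gs) // pk) % p
--         s.append(sk)
--         sp.append(sk)
--         pk *= p
--     return tuple(s)
-- ===== Notes on version B (the rewrite author's own statement) =====
-- stated objective: alternative
-- what changed: B maintains the power towers x[i]^(p^(k-i)), y[i]^(p^(k-i)), s[i]^(p^(k-i)) and p^k incrementally (one p-th power per cached entry per step) instead of recomputing each p**(k-i)-th power from scratch at every k, and computes both ghost components and the correction sum in a single inner loop; intended as faster (measured 2.0x at n=64) but the doubly-exponential ghost values dominate, so a timing run could not confirm it at larger sizes.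
import Mathlib
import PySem

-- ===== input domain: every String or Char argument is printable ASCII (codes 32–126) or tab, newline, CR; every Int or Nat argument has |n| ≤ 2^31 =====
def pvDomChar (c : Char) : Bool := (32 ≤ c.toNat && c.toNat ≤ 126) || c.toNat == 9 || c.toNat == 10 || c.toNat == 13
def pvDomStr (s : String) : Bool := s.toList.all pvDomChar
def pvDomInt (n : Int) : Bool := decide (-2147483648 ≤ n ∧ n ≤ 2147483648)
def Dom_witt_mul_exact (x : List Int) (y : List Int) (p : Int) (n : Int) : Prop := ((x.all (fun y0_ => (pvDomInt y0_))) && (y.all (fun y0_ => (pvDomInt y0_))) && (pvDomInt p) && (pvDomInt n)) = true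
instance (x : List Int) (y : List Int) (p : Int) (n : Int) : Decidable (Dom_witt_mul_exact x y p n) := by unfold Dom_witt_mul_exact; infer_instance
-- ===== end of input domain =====

-- B maintains every p-power tower incrementally (one p-th power per cached entry per
-- step) instead of recomputing a[i]**(p**(k-i)) from scratch at each k; same exact values.

-- ===== PORT A =====
-- ghost(a, k) = sum(p**i * a[i]**(p**(k-i)) for i in range(k+1)); a[i] is in range and
-- the exponent p**(k-i) is nonnegative under Pre_, so getD 0 / .toNat are exact there.
def pvGhost (p : Int) (a : List Int) (k : Nat) : Int :=
  (List.range (k + 1)).foldl (fun acc i => acc + p ^ i * (a.getD i 0) ^ (p ^ (k - i)).toNat) 0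

-- one iteration of A's loop over k: s.append(((ghost_prod[k] - sum(...)) // p**k) % p)
def pvStepA (p : Int) (gp : List Int) (s : List Int) (k : Nat) : List Int :=
  let rhs := gp.getD k 0 -
    (List.range k).foldl (fun acc i => acc + p ^ i * (s.getD i 0) ^ (p ^ (k - i)).toNat) 0
  s ++ [PySem.Int.mod (PySem.Int.floordiv rhs (p ^ k)) p]

def witt_mul_exact (x : List Int) (y : List Int) (p : Int) (n : Int) : List Int :=
  let ghost_prod := (List.range n.toNat).map (fun k => pvGhost p x k * pvGhost p y k)
  (List.range n.toNat).foldl (pvStepA p ghost_prod) []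

-- ===== PORT B =====
-- inner loop of Source B: g = (pi, gx, gy, gs); Python's v ** p with p ≥ 0 is v ^ p.toNat (exact under Pre_)
def pvInner (p : Int) (k : Nat) (xs ys sp : List Int) (g : Int × Int × Int × Int) (i : Nat) :
    Int × Int × Int × Int :=
  (g.1 * p,
   g.2.1 + g.1 * xs.getD i 0,
   g.2.2.1 + g.1 * ys.getD i 0,
   if i < k then g.2.2.2 + g.1 * sp.getD i 0 else g.2.2.2)

-- one iteration of Source B's outer loop; state = (s, xs, ys, sp, pk)
def pvStepB (x y : List Int) (p : Int)
    (st : List Int × List Int × List Int × List Int × Int) (k : Nat) :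
    List Int × List Int × List Int × List Int × Int :=
  let xs := st.2.1.map (fun v => v ^ p.toNat) ++ [x.getD k 0]
  let ys := st.2.2.1.map (fun v => v ^ p.toNat) ++ [y.getD k 0]
  let sp := st.2.2.2.1.map (fun v => v ^ p.toNat)
  let g := (List.range (k + 1)).foldl (pvInner p k xs ys sp) (1, 0, 0, 0)
  let sk := PySem.Int.mod (PySem.Int.floordiv (g.2.1 * g.2.2.1 - g.2.2.2) st.2.2.2.2) p
  (st.1 ++ [sk], xs, ys, sp ++ [sk], st.2.2.2.2 * p)

def witt_mul_exact_alt (x : List Int) (y : List Int) (p : Int) (n : Int) : List Int :=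
  ((List.range n.toNat).foldl (pvStepB x y p) ([], [], [], [], 1)).1

-- ===== PRECONDITION & SPEC =====
-- Exactly where Python A returns an int tuple: for n ≤ 0 it returns () unconditionally;
-- for n ≥ 1 it needs n entries of x and y, and p ≥ 1 (p = 0 raises ZeroDivisionError,
-- p < 0 produces float results via negative exponents) — except that for n = 1 every
-- exponent is p**0, so any p ≠ 0 yields an int result there.
def Pre_witt_mul_exact (x : List Int) (y : List Int) (p : Int) (n : Int) : Prop :=
  n ≤ 0 ∨ (n ≤ x.length ∧ n ≤ y.length ∧ (1 ≤ p ∨ (n = 1 ∧ p ≠ 0)))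
instance (x : List Int) (y : List Int) (p : Int) (n : Int) : Decidable (Pre_witt_mul_exact x y p n) := by unfold Pre_witt_mul_exact; infer_instance

def pvWitness_witt_mul_exact : List Int × List Int × Int × Int := ([2, 3], [4, 5], 3, 2)

def Spec_witt_mul_exact (x : List Int) (y : List Int) (p : Int) (n : Int) (out : List Int) : Prop := out = witt_mul_exact_alt x y p n
instance (x : List Int) (y : List Int) (p : Int) (n : Int) (out : List Int) : Decidable (Spec_witt_mul_exact x y p n out) := by unfold Spec_witt_mul_exact; infer_instance

-- ===== CLAIM (what is proved, stated in full; the proofs are below) =====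
def Claim_equal_witt_mul_exact : Prop := ∀ (x : List Int) (y : List Int) (p : Int) (n : Int), Dom_witt_mul_exact x y p n → Pre_witt_mul_exact x y p n → Spec_witt_mul_exact x y p n (witt_mul_exact x y p n)

-- ===== LEMMAS AND PROOFS =====

-- (p^j).toNat = p.toNat^j for 0 ≤ p
theorem pv_toNat_pow (p : Int) (hp : 0 ≤ p) (j : Nat) : (p ^ j).toNat = p.toNat ^ j := by
  induction j with
  | zero => simp
  | succ j ih => rw [pow_succ, pow_succ, Int.toNat_mul (pow_nonneg hp j) hp, ih]

-- the cached power list after m iterations: entry i holds a[i] ^ p.toNat ^ (m-1-i)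
def pvPw (p : Int) (a : List Int) (m : Nat) : List Int :=
  (List.range m).map (fun i => a.getD i 0 ^ p.toNat ^ (m - 1 - i))

theorem pvPw_succ (p : Int) (a : List Int) (m : Nat) :
    (pvPw p a m).map (fun v => v ^ p.toNat) ++ [a.getD m 0] = pvPw p a (m + 1) := by
  unfold pvPw
  rw [List.range_succ, List.map_append, List.map_map]
  congr 1
  · apply List.map_congr_left
    intro i hi
    rw [List.mem_range] at hi
    simp only [Function.comp_apply, ← pow_mul, ← pow_succ]
    congr 2
    omega
  · simp

theorem pvPw_getD (p : Int) (a : List Int) (m i : Nat) (h : i < m) :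
    (pvPw p a m).getD i 0 = a.getD i 0 ^ p.toNat ^ (m - 1 - i) := by
  unfold pvPw
  rw [List.getD_eq_getElem?_getD, List.getElem?_map, List.getElem?_range h]
  rfl

-- closed form of Source B's inner loop
theorem pvInner_spec (p : Int) (k : Nat) (xs ys sp : List Int) (m : Nat) :
    (List.range m).foldl (pvInner p k xs ys sp) (1, 0, 0, 0) =
      (p ^ m,
       (List.range m).foldl (fun acc i => acc + p ^ i * xs.getD i 0) 0,
       (List.range m).foldl (fun acc i => acc + p ^ i * ys.getD i 0) 0,
       (List.range m).foldl (fun acc i => acc + if i < k then p ^ i * sp.getD i 0 else 0) 0) := by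
  induction m with
  | zero => simp [pvInner]
  | succ m ih =>
      rw [List.range_succ, List.foldl_append, List.foldl_append, List.foldl_append,
        List.foldl_append, ih]
      simp only [List.foldl_cons, List.foldl_nil, pvInner]
      refine Prod.ext ?_ (Prod.ext ?_ (Prod.ext ?_ ?_)) <;> simp [pow_succ]
      by_cases h : m < k <;> simp [h]

-- drop the guard: summing the guarded term over range (k+1) is summing over range k
theorem pv_guard_sum (f : Nat → Int) (k : Nat) :
    (List.range (k + 1)).foldl (fun acc i => acc + if i < k then f i else 0) 0 =
      (List.range k).foldl (fun acc i => acc + f i) 0 := by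
  rw [List.range_succ, List.foldl_append]
  simp only [List.foldl_cons, List.foldl_nil, lt_irrefl, if_false, add_zero]
  rw [PySem.List.foldl_add, PySem.List.foldl_add, zero_add, zero_add]
  refine congrArg List.sum (List.map_congr_left ?_)
  intro i hi
  rw [List.mem_range] at hi
  simp [hi]

-- termwise congruence for the ghost-shaped sums
theorem pv_sum_congr (f g : Nat → Int) (m : Nat) (h : ∀ i < m, f i = g i) :
    (List.range m).foldl (fun acc i => acc + f i) 0 =
      (List.range m).foldl (fun acc i => acc + g i) 0 := by
  rw [PySem.List.foldl_add, PySem.List.foldl_add, zero_add, zero_add]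
  refine congrArg List.sum (List.map_congr_left ?_)
  intro i hi
  exact h i (List.mem_range.mp hi)

-- A's loop appends one element per iteration
theorem pvStepA_len (p : Int) (gp : List Int) (m : Nat) :
    ((List.range m).foldl (pvStepA p gp) []).length = m := by
  induction m with
  | zero => simp
  | succ m ih => rw [List.range_succ, List.foldl_append]; simp [pvStepA, ih]

-- the ghost sum over the updated power list equals A's ghost
theorem pv_ghost_eq (p : Int) (hp : 1 ≤ p) (a : List Int) (m : Nat) :
    (List.range (m + 1)).foldl
        (fun acc i => acc + p ^ i * (pvPw p a (m + 1)).getD i 0) 0 = pvGhost p a m := by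
  unfold pvGhost
  apply pv_sum_congr
  intro i hi
  rw [pvPw_getD p a (m + 1) i hi, pv_toNat_pow p (by omega) (m - i)]
  congr 2

-- main invariant: after m iterations B's state is A's s, the three power lists and p^m
theorem pv_main_inv (x y : List Int) (p : Int) (hp : 1 ≤ p) (gp : List Int) (m : Nat)
    (hgp : ∀ k < m, gp.getD k 0 = pvGhost p x k * pvGhost p y k) :
    (List.range m).foldl (pvStepB x y p) ([], [], [], [], 1) =
      ((List.range m).foldl (pvStepA p gp) [],
       pvPw p x m, pvPw p y m,
       pvPw p ((List.range m).foldl (pvStepA p gp) []) m, p ^ m) := by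
  induction m with
  | zero => simp [pvPw]
  | succ m ih =>
      have ihm := ih (fun k hk => hgp k (Nat.lt_succ_of_lt hk))
      rw [List.range_succ, List.foldl_append, List.foldl_cons, List.foldl_nil, ihm]
      set s := (List.range m).foldl (pvStepA p gp) [] with hs
      have hlen : s.length = m := pvStepA_len p gp m
      -- unfold one B step
      show pvStepB x y p (s, pvPw p x m, pvPw p y m, pvPw p s m, p ^ m) m = _
      unfold pvStepB
      simp only [pvPw_succ, pvInner_spec]
      rw [List.foldl_append, List.foldl_cons, List.foldl_nil]
      -- identify sk with A's appended element
      have hgx := pv_ghost_eq p hp x m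
      have hgy := pv_ghost_eq p hp y m
      have hgs : (List.range (m + 1)).foldl
          (fun acc i => acc + if i < m then p ^ i * ((pvPw p s m).map (fun v => v ^ p.toNat)).getD i 0 else 0) 0 =
          (List.range m).foldl
            (fun acc i => acc + p ^ i * (s.getD i 0) ^ (p ^ (m - i)).toNat) 0 := by
        rw [pv_guard_sum]
        apply pv_sum_congr
        intro i hi
        have : ((pvPw p s m).map (fun v => v ^ p.toNat)).getD i 0
            = (s.getD i 0) ^ (p ^ (m - i)).toNat := by
          have h1 : i < (pvPw p s m).length := by simp [pvPw, hi]
          rw [List.getD_eq_getElem?_getD, List.getElem?_map,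
            List.getElem?_eq_getElem h1]
          simp only [Option.map_some, Option.getD_some]
          have h2 : (pvPw p s m)[i] = s.getD i 0 ^ p.toNat ^ (m - 1 - i) := by
            have := pvPw_getD p s m i hi
            rwa [List.getD_eq_getElem?_getD, List.getElem?_eq_getElem h1,
              Option.getD_some] at this
          rw [h2, ← pow_mul, pv_toNat_pow p (by omega) (m - i)]
          congr 1
          have : m - 1 - i + 1 = m - i := by omega
          rw [← this, pow_succ]
        rw [this]
      have hsk : PySem.Int.mod (PySem.Int.floordiv
          ((List.range (m + 1)).foldl (fun acc i => acc + p ^ i * (pvPw p x (m + 1)).getD i 0) 0 *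
           (List.range (m + 1)).foldl (fun acc i => acc + p ^ i * (pvPw p y (m + 1)).getD i 0) 0 -
           (List.range (m + 1)).foldl (fun acc i => acc + if i < m then p ^ i * ((pvPw p s m).map (fun v => v ^ p.toNat)).getD i 0 else 0) 0)
          (p ^ m)) p
          = PySem.Int.mod (PySem.Int.floordiv
            (gp.getD m 0 - (List.range m).foldl (fun acc i => acc + p ^ i * (s.getD i 0) ^ (p ^ (m - i)).toNat) 0)
            (p ^ m)) p := by
        rw [hgx, hgy, hgs, hgp m (Nat.lt_succ_self m)]
      refine Prod.ext ?_ (Prod.ext ?_ (Prod.ext ?_ (Prod.ext ?_ ?_)))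
      · simp only [hsk]
        rw [pvStepA]
      · rfl
      · rfl
      · -- sp ++ [sk] = pvPw of the new s over m+1
        simp only [hsk]
        have hnew : (List.range m).foldl (pvStepA p gp) [] ++
            [PySem.Int.mod (PySem.Int.floordiv
              (gp.getD m 0 - (List.range m).foldl (fun acc i => acc + p ^ i * (s.getD i 0) ^ (p ^ (m - i)).toNat) 0)
              (p ^ m)) p] = pvStepA p gp s m := by rw [pvStepA]
        rw [← hs]
        set sk := PySem.Int.mod (PySem.Int.floordiv
          (gp.getD m 0 - (List.range m).foldl (fun acc i => acc + p ^ i * (s.getD i 0) ^ (p ^ (m - i)).toNat) 0)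
          (p ^ m)) p with hsk'
        have hpw : pvPw p (s ++ [sk]) m = pvPw p s m := by
          unfold pvPw
          apply List.map_congr_left
          intro i hi
          rw [List.mem_range] at hi
          have hil : i < s.length := by omega
          rw [List.getD_append _ _ _ _ hil]
        have : pvPw p (s ++ [sk]) (m + 1) = (pvPw p s m).map (fun v => v ^ p.toNat) ++ [sk] := by
          rw [← pvPw_succ, hpw]
          congr 1
          have hml : s.length ≤ m := by omega
          rw [List.getD_append_right _ _ _ _ hml]
          simp [hlen]
        rw [pvStepA, this]
      · simp [pow_succ]

-- for n = 1 and any p ≠ 0 all exponents are p^0 = 1, and both sides give [(x0*y0) % p]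
theorem pv_n_one (x y : List Int) (p : Int) :
    witt_mul_exact x y p 1 = witt_mul_exact_alt x y p 1 := by
  simp only [witt_mul_exact, witt_mul_exact_alt, Int.toNat_one, List.range_one,
    List.foldl_cons, List.foldl_nil, List.map_cons, List.map_nil,
    pvStepA, pvStepB, pvGhost, List.range_zero]
  simp [pvInner]

theorem witt_mul_exact_eq (x y : List Int) (p n : Int)
    (hpre : Pre_witt_mul_exact x y p n) :
    witt_mul_exact x y p n = witt_mul_exact_alt x y p n := by
  rcases hpre with hn | ⟨hx, hy, hp | ⟨hn1, hp0⟩⟩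
  · have : n.toNat = 0 := by omega
    simp [witt_mul_exact, witt_mul_exact_alt, this]
  · unfold witt_mul_exact witt_mul_exact_alt
    rw [pv_main_inv x y p hp _ n.toNat]
    intro k hk
    rw [List.getD_eq_getElem?_getD, List.getElem?_map, List.getElem?_range hk]
    rfl
  · subst hn1
    exact pv_n_one x y p

-- ===== VERDICT (by name: the statement is the Claim_ definition above) =====
theorem witt_mul_exact_spec : Claim_equal_witt_mul_exact := by
  intro x y p n _ hpre
  unfold Spec_witt_mul_exact
  exact witt_mul_exact_eq x y p n hpre
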